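-- pv_equiv track=rewrite | github.com/George-Saeid/Summary-Flow-Project | yyy.py | divide_number
-- ===== SOURCE A (Python) =====
-- def divide_number(number):
--     if number == 1 or number == 2 or number == 3:
--         return number,  # Return a tuple with a single element
--     if number % 3 == 0 or number % 2 == 0:
--         return number,  # Return a tuple with a single element
--     else:
--         # Start values
--         large_part = number - 2
--         small_part = 2
--         # Find two valuse divisible by 2 or 3 there sum equals the input number
--         while True:
--             if (large_part % 3 == 0 or large_part % 2 == 0) and (small_part % 3 == 0 or small_part % 2 == 0):
--                 # The two values were found
--                 break
--             else:
--                 large_part -= 1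
--                 small_part += 1
--         return large_part, small_part
-- ===== SOURCE B (Python) =====
-- def divide_number(number):
--     if number in (1, 2, 3) or number % 2 == 0 or number % 3 == 0:
--         return number,
--     # number is odd and not a multiple of 3, so number % 3 is 1 or 2
--     if number % 3 == 2:
--         return number - 2, 2
--     return number - 3, 3
-- ===== Notes on version B (the rewrite author's own statement) =====
-- stated objective: simpler
-- what changed: Replaced the search loop with a direct residue computation: the remaining case (odd, not divisible by 3) splits as (n-2,2) when n%3==2 and (n-3,3) when n%3==1.
import Mathlib
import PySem

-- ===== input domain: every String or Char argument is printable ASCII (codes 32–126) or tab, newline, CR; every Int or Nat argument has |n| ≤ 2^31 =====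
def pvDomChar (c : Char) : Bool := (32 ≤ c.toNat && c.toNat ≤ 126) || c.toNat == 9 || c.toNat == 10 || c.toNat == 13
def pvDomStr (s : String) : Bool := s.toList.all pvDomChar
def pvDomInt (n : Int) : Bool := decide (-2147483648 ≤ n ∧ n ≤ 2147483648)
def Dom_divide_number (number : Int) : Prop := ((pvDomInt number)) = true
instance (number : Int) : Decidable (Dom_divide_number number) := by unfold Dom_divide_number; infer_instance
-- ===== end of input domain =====

-- B replaces A's search loop by a direct residue case split (objective: simpler); proven equal on Dom.


-- ===== PORT A =====
-- A's `while True` loop; the fuel only makes the recursion total (the loop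
-- always breaks within two iterations on the inputs A's else-branch reaches).
def divide_number_loop (fuel : Nat) (large_part small_part : Int) : List Int :=
  match fuel with
  | 0 => []
  | f + 1 =>
    if (PySem.Int.mod large_part 3 == 0 || PySem.Int.mod large_part 2 == 0)
        && (PySem.Int.mod small_part 3 == 0 || PySem.Int.mod small_part 2 == 0) then
      [large_part, small_part]
    else
      divide_number_loop f (large_part - 1) (small_part + 1)

def divide_number (number : Int) : List Int :=
  if number == 1 || number == 2 || number == 3 then
    [number]
  else if PySem.Int.mod number 3 == 0 || PySem.Int.mod number 2 == 0 then
    [number]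
  else
    divide_number_loop (number.natAbs + 7) (number - 2) 2

-- ===== PORT B =====
def divide_number_alt (number : Int) : List Int :=
  if number == 1 || number == 2 || number == 3
      || PySem.Int.mod number 2 == 0 || PySem.Int.mod number 3 == 0 then
    [number]
  else if PySem.Int.mod number 3 == 2 then
    [number - 2, 2]
  else
    [number - 3, 3]

-- ===== PRECONDITION & SPEC =====
def Spec_divide_number (number : Int) (out : List Int) : Prop := out = divide_number_alt number
instance (number : Int) (out : List Int) : Decidable (Spec_divide_number number out) := by unfold Spec_divide_number; infer_instance

-- ===== CLAIM (what is proved, stated in full; the proofs are below) =====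
def Claim_equal_divide_number : Prop := ∀ (number : Int), Dom_divide_number number → Spec_divide_number number (divide_number number)

-- ===== LEMMAS AND PROOFS =====
theorem pymod_eq (n : Int) (b : Int) (hb : 0 < b) : PySem.Int.mod n b = n % b := by
  simp [PySem.Int.mod_eq_emod_of_pos, hb]

-- ===== VERDICT (by name: the statement is the Claim_ definition above) =====
theorem divide_number_spec : Claim_equal_divide_number := by
  intro n _
  show divide_number n = divide_number_alt n
  unfold divide_number divide_number_alt
  rw [pymod_eq n 3 (by omega), pymod_eq n 2 (by omega)]
  by_cases h1 : n = 1 ∨ n = 2 ∨ n = 3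
  · rcases h1 with h | h | h <;> subst h <;> decide
  · simp only [show (n == 1 || n == 2 || n == 3) = false by
      simp only [Bool.or_eq_false_iff, beq_eq_false_iff_ne]; tauto]
    by_cases h3 : n % 3 = 0
    · simp [h3]
    · by_cases h2 : n % 2 = 0
      · simp [h2]
      · simp only [show (n % 3 == 0 || n % 2 == 0) = false by simp [h3, h2],
          Bool.false_eq_true, if_false]
        have h6 : n % 6 = 1 ∨ n % 6 = 5 := by omega
        unfold divide_number_loop
        rw [pymod_eq (n - 2) 3 (by omega), pymod_eq (n - 2) 2 (by omega)]
        simp only [show (PySem.Int.mod 2 3 == 0 || PySem.Int.mod 2 2 == 0) = true by decide,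
          Bool.and_true]
        rcases h6 with h6 | h6
        · -- n % 3 = 1: loop takes one extra step, result (n-3, 3)
          simp only [show ((n - 2) % 3 == 0 || (n - 2) % 2 == 0) = false by
            simp only [Bool.or_eq_false_iff, beq_eq_false_iff_ne]; omega,
            Bool.false_eq_true, if_false,
            show (n % 3 == 2) = false by simp only [beq_eq_false_iff_ne]; omega]
          unfold divide_number_loop
          cases hh : n.natAbs + 7 - 1 with
          | zero => omega
          | succ f =>
            rw [pymod_eq (n - 2 - 1) 3 (by omega), pymod_eq (n - 2 - 1) 2 (by omega)]
            simp only [show ((n - 2 - 1) % 3 == 0) = false by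
                simp only [beq_eq_false_iff_ne]; omega,
              show ((n - 2 - 1) % 2 == 0) = true by simp only [beq_iff_eq]; omega,
              Bool.false_or, Bool.true_and]
            norm_num
            rw [if_neg (by omega : ¬(2 ∣ n ∨ 3 ∣ n))]
            congr 1
            omega
        · -- n % 3 = 2: loop succeeds immediately, result (n - 2, 2)
          simp only [show ((n - 2) % 3 == 0) = true by simp only [beq_iff_eq]; omega, Bool.true_or,
            show (n % 3 == 2) = true by simp only [beq_iff_eq]; omega]
          norm_num
          constructor <;> omega
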